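-- pv_equiv track=rewrite | github.com/MrBrantCode/unitest_baseline | mut_generate/mist_train_taco/taco_9138/solution.py | largest_subarray_gcd_atleast_k
-- ===== SOURCE A (Python) =====
-- from math import gcd
--
-- def largest_subarray_gcd_atleast_k(array, N, K):
--     max_length = 0
--
--     for x in range(N):
--         if array[x] < K:
--             continue
--
--         current_gcd = array[x]
--         subarray_length = 1
--
--         for y in range(x + 1, N):
--             if array[y] < K or current_gcd < K:
--                 break
--
--             current_gcd = gcd(current_gcd, array[y])
--             if current_gcd >= K:
--                 subarray_length = y - x + 1
--
--         max_length = max(max_length, subarray_length)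
--
--     return max_length
-- ===== SOURCE B (Python) =====
-- from math import gcd
--
-- def largest_subarray_gcd_atleast_k(array, N, K):
--     # One forward pass: maintain (gcd, window length) for the windows ending at the
--     # current index, keeping one entry per distinct gcd (longest length), reset when
--     # an element < K kills every such window.
--     best = 0
--     pairs = []  # (g, l): g = gcd of the window of length l ending here; distinct g, l increasing
--     for i in range(N):
--         a = array[i]
--         if a < K:
--             pairs = []
--         else:
--             new = [(a, 1)]
--             for g, l in pairs:
--                 ng = gcd(g, a)
--                 if new[-1][0] == ng:
--                     new[-1] = (ng, l + 1)
--                 else: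
--                     new.append((ng, l + 1))
--             pairs = new
--             for g, l in pairs:
--                 if g >= K and l > best:
--                     best = l
--     return best
-- ===== Notes on version B (the rewrite author's own statement) =====
-- stated objective: alternative
-- what changed: Replaced A's restart-per-start nested scan (forward gcd with early break for each start) by a single forward pass that maintains one (gcd, longest-length) pair per distinct gcd of the windows ending at the current index, reset whenever an element < K kills every such window.
import Mathlib
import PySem

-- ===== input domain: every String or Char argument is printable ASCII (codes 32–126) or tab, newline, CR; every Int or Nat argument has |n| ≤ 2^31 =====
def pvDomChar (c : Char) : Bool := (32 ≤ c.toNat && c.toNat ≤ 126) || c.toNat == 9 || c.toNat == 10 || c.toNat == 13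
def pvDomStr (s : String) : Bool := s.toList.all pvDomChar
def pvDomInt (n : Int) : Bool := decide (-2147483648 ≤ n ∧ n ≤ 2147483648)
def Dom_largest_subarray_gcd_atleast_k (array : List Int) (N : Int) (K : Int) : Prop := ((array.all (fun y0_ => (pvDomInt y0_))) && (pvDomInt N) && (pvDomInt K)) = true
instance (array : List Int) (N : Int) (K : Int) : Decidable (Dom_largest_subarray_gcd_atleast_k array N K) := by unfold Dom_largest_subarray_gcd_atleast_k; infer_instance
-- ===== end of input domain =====

-- B replaces A's restart-per-start nested scan by one forward pass that maintains the
-- gcds of all windows ending at the current index (objective: alternative algorithm).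

-- ===== PORT A =====
-- math.gcd (always ≥ 0, gcd of absolute values)
def gcdI (g v : Int) : Int := ((Int.gcd g v : Nat) : Int)

-- inner 'for y in range(x+1, N)' loop of A, with state (current_gcd, subarray_length);
-- 'break' returns the state's length. array[y] is in range under Pre_ (pyGetD default unused).
def aInner (array : List Int) (K : Int) (x : Int) : List Int → Int → Int → Int
  | [], _, len => len
  | y :: ys, g, len =>
    let ay := PySem.List.pyGetD array y 0
    if ay < K ∨ g < K then len
    else aInner array K x ys (gcdI g ay) (if K ≤ gcdI g ay then y - x + 1 else len)

def largest_subarray_gcd_atleast_k (array : List Int) (N : Int) (K : Int) : Int :=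
  (PySem.List.pyRange 0 N 1).foldl (fun ml x =>
    let ax := PySem.List.pyGetD array x 0
    if ax < K then ml
    else max ml (aInner array K x (PySem.List.pyRange (x + 1) N 1) ax 1)) 0

-- ===== PORT B =====
-- inner "for g, l in pairs: ... new[-1] overwrite / append" loop of B: cur is the last
-- entry of new (overwritten on equal gcd), emitted when the next gcd differs
def bUpd (a : Int) (cur : Int × Int) : List (Int × Int) → List (Int × Int)
  | [] => [cur]
  | (g, l) :: rest =>
    let ng := gcdI g a
    if cur.1 = ng then bUpd a (ng, l + 1) rest
    else cur :: bUpd a (ng, l + 1) rest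

-- "for g, l in pairs: if g >= K and l > best: best = l"
def bScanP (K : Int) : List (Int × Int) → Int → Int
  | [], best => best
  | (g, l) :: ps, best => bScanP K ps (if K ≤ g ∧ best < l then l else best)

def largest_subarray_gcd_atleast_k_alt (array : List Int) (N : Int) (K : Int) : Int :=
  ((PySem.List.pyRange 0 N 1).foldl (fun st i =>
      let a := PySem.List.pyGetD array i 0
      if a < K then (st.1, ([] : List (Int × Int)))
      else
        let pairs := bUpd a (a, 1) st.2
        (bScanP K pairs st.1, pairs)) ((0 : Int), ([] : List (Int × Int)))).1

-- ===== PRECONDITION & SPEC =====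
-- A raises IndexError iff N > len(array) (array[x] for x < N); everything else returns.
def Pre_largest_subarray_gcd_atleast_k (array : List Int) (N : Int) (K : Int) : Prop :=
  N ≤ (array.length : Int)
instance (array : List Int) (N : Int) (K : Int) : Decidable (Pre_largest_subarray_gcd_atleast_k array N K) := by unfold Pre_largest_subarray_gcd_atleast_k; infer_instance

def pvWitness_largest_subarray_gcd_atleast_k : List Int × Int × Int := ([6, 4, 12, 3], 4, 2)

def Spec_largest_subarray_gcd_atleast_k (array : List Int) (N : Int) (K : Int) (out : Int) : Prop := out = largest_subarray_gcd_atleast_k_alt array N K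
instance (array : List Int) (N : Int) (K : Int) (out : Int) : Decidable (Spec_largest_subarray_gcd_atleast_k array N K out) := by unfold Spec_largest_subarray_gcd_atleast_k; infer_instance

-- ===== CLAIM (what is proved, stated in full; the proofs are below) =====
def Claim_equal_largest_subarray_gcd_atleast_k : Prop := ∀ (array : List Int) (N : Int) (K : Int), Dom_largest_subarray_gcd_atleast_k array N K → Pre_largest_subarray_gcd_atleast_k array N K → Spec_largest_subarray_gcd_atleast_k array N K (largest_subarray_gcd_atleast_k array N K)

-- ===== LEMMAS AND PROOFS =====

-- running gcd of a window: wg g l = fold of math.gcd over l starting from g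
def wg (g : Int) (l : List Int) : Int := l.foldl gcdI g

-- greedy extension count of A's inner loop (given current gcd g, assumed ≥ K)
def Lg (K : Int) : List Int → Int → Int
  | [], _ => 0
  | v :: vs, g => if v < K then 0 else if gcdI g v < K then 0 else 1 + Lg K vs (gcdI g v)

-- A's value for one start: longest good window starting at the head (0 if head < K)
def pl (K : Int) : List Int → Int
  | [] => 0
  | v :: vs => if v < K then 0 else 1 + Lg K vs v

-- structural twin of A's inner loop on the remaining suffix (cnt = y - x + 1)
def goA (K : Int) : List Int → Int → Int → Int → Int
  | [], _, _, len => len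
  | v :: vs, g, cnt, len =>
    if v < K ∨ g < K then len
    else goA K vs (gcdI g v) (cnt + 1) (if K ≤ gcdI g v then cnt else len)

-- structural twin of A's outer loop
def outA (K : Int) : List Int → Int → Int
  | [], best => best
  | v :: vs, best => outA K vs (if v < K then best else max best (goA K vs v 2 1))

-- maximum good-window length over all windows (A-shaped: max over starts)
def MG (K : Int) : List Int → Int
  | [] => 0
  | v :: vs => max (pl K (v :: vs)) (MG K vs)

-- B's rolling state: gcds of the windows ending at the current position, shortest first
def sfxStep (K : Int) (s : List Int) (a : Int) : List Int :=
  if a < K then [] else a :: s.map (fun g => gcdI g a)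

def sfxF (K : Int) (l : List Int) : List Int := l.foldl (sfxStep K) []

def stepB2 (K : Int) (st : Int × List (Int × Int)) (a : Int) : Int × List (Int × Int) :=
  if a < K then (st.1, [])
  else
    let pairs := bUpd a (a, 1) st.2
    (bScanP K pairs st.1, pairs)

-- x = (g, l) is an actual (gcd, length) pair of a window ending at the current index,
-- where s lists the window gcds by length (s[j] = gcd of the window of length j+1)
def Rea (s : List Int) (x : Int × Int) : Prop :=
  ∃ j : Nat, j < s.length ∧ x.2 = (j : Int) + 1 ∧ s[j]? = some x.1

-- x covers index i of s: a pair at least as long whose gcd equals s[i]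
def Cov (s : List Int) (i : Nat) (x : Int × Int) : Prop :=
  ∃ j : Nat, i ≤ j ∧ j < s.length ∧ x.2 = (j : Int) + 1 ∧ s[j]? = some x.1 ∧ s[j]? = s[i]?

-- the dedup invariant: every pair realized, every index covered, lengths increasing
def PInv (P : List (Int × Int)) (s : List Int) : Prop :=
  (∀ x ∈ P, Rea s x) ∧ (∀ i : Nat, i < s.length → ∃ x ∈ P, Cov s i x) ∧
    List.Pairwise (fun x y : Int × Int => x.2 < y.2) P

-- largest length among pairs with gcd ≥ K (0 if none)
def maxQ (K : Int) : List (Int × Int) → Int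
  | [] => 0
  | (g, l) :: ps => max (if K ≤ g then l else 0) (maxQ K ps)

-- largest 1-based position in gs whose entry is ≥ K (0 if none)
def msl (K : Int) : List Int → Int
  | [] => 0
  | g :: gs => if msl K gs = 0 then (if K ≤ g then 1 else 0) else msl K gs + 1

-- longest good window ending at the last element
def esl (K : Int) (l : List Int) : Int := msl K (sfxF K l)

theorem gcdI_nonneg (g v : Int) : 0 ≤ gcdI g v := Int.natCast_nonneg _

theorem gcdI_dvd_left (g v : Int) : gcdI g v ∣ g := Int.gcd_dvd_left g v

theorem gcdI_ne_zero (g v : Int) (h : v ≠ 0) : gcdI g v ≠ 0 := by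
  simp [gcdI, Int.gcd_eq_zero_iff, h]

theorem wg_nil (g : Int) : wg g [] = g := rfl
theorem wg_cons (g v : Int) (l : List Int) : wg g (v :: l) = wg (gcdI g v) l := rfl
theorem wg_append_singleton (g a : Int) (l : List Int) : wg g (l ++ [a]) = gcdI (wg g l) a := by
  simp [wg, List.foldl_append]

theorem wg_dvd (l : List Int) : ∀ g, wg g l ∣ g := by
  induction l with
  | nil => intro g; exact dvd_rfl
  | cons v vs ih => intro g; exact (ih (gcdI g v)).trans (gcdI_dvd_left g v)

theorem wg_ne_zero (l : List Int) : ∀ g, g ≠ 0 → wg g l ≠ 0 := by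
  induction l with
  | nil => intro g hg; exact hg
  | cons v vs ih =>
    intro g hg
    refine ih (gcdI g v) ?_
    simp [gcdI, Int.gcd_eq_zero_iff]
    intro h; exact absurd h hg

theorem wg_nonneg (l : List Int) : ∀ g, 0 ≤ g → 0 ≤ wg g l := by
  induction l with
  | nil => intro g hg; exact hg
  | cons v vs ih => intro g _; exact ih (gcdI g v) (gcdI_nonneg g v)

theorem wg_pos (l : List Int) (g : Int) (hg : 0 < g) : 0 < wg g l :=
  lt_of_le_of_ne (wg_nonneg l g hg.le) (fun h => wg_ne_zero l g hg.ne' h.symm)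

-- K ≤ gcd(w, a) and 0 < w imply K ≤ w
theorem le_of_le_gcdI (K w a : Int) (h : K ≤ gcdI w a) (hw : 0 < w) : K ≤ w :=
  h.trans (Int.le_of_dvd hw (gcdI_dvd_left w a))

theorem Lg_nonneg (K : Int) (vs : List Int) : ∀ g, 0 ≤ Lg K vs g := by
  induction vs with
  | nil => intro g; simp [Lg]
  | cons v vs ih =>
    intro g
    simp only [Lg]
    split_ifs with h1 h2
    · omega
    · omega
    · have := ih (gcdI g v); omega

theorem Lg_le_length (K : Int) (vs : List Int) : ∀ g, Lg K vs g ≤ (vs.length : Int) := by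
  induction vs with
  | nil => intro g; simp [Lg]
  | cons v vs ih =>
    intro g
    simp only [Lg, List.length_cons]
    split_ifs with h1 h2
    · push_cast; omega
    · push_cast; omega
    · have := ih (gcdI g v); push_cast; omega

theorem Lg_snoc (K a : Int) (vs : List Int) : ∀ g,
    Lg K (vs ++ [a]) g =
      if Lg K vs g = (vs.length : Int) ∧ ¬ a < K ∧ K ≤ gcdI (wg g vs) a
      then (vs.length : Int) + 1 else Lg K vs g := by
  induction vs with
  | nil =>
    intro g
    simp only [List.nil_append, Lg, List.length_nil, Nat.cast_zero, wg_nil]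
    by_cases ha : a < K
    · rw [if_pos ha, if_neg]
      rintro ⟨-, h, -⟩; exact h ha
    · by_cases hg : gcdI g a < K
      · rw [if_neg ha, if_pos hg, if_neg]
        rintro ⟨-, -, h⟩; omega
      · rw [if_neg ha, if_neg hg, if_pos ⟨trivial, ha, by omega⟩]
        omega
  | cons v vs ih =>
    intro g
    by_cases h1 : v < K
    · simp only [List.cons_append, Lg, if_pos h1, List.length_cons]
      rw [if_neg]
      rintro ⟨h, -⟩
      push_cast at h; omega
    · by_cases h2 : gcdI g v < K
      · simp only [List.cons_append, Lg, if_neg h1, if_pos h2, List.length_cons]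
        rw [if_neg]
        rintro ⟨h, -⟩
        push_cast at h; omega
      · simp only [List.cons_append, Lg, if_neg h1, if_neg h2, List.length_cons, wg_cons]
        rw [ih (gcdI g v)]
        by_cases hc : Lg K vs (gcdI g v) = (vs.length : Int) ∧ ¬ a < K ∧ K ≤ gcdI (wg (gcdI g v) vs) a
        · rw [if_pos hc, if_pos ⟨by have := hc.1; push_cast; omega, hc.2.1, hc.2.2⟩]
          push_cast; ring
        · rw [if_neg hc]
          have hn : ¬ (1 + Lg K vs (gcdI g v) = ((vs.length + 1 : Nat) : Int) ∧ ¬ a < K ∧ K ≤ gcdI (wg (gcdI g v) vs) a) := by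
            rintro ⟨h1', h2', h3'⟩
            exact hc ⟨by push_cast at h1'; omega, h2', h3'⟩
          rw [if_neg hn]

theorem Lg_sound (K : Int) (vs : List Int) : ∀ g, K ≤ g → Lg K vs g = (vs.length : Int) →
    (∀ u ∈ vs, K ≤ u) ∧ K ≤ wg g vs := by
  induction vs with
  | nil => intro g hg _; exact ⟨by simp, hg⟩
  | cons v vs ih =>
    intro g hg h
    simp only [Lg, List.length_cons] at h
    by_cases h1 : v < K
    · rw [if_pos h1] at h; push_cast at h; omega
    · rw [if_neg h1] at h
      by_cases h2 : gcdI g v < K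
      · rw [if_pos h2] at h; push_cast at h; omega
      · rw [if_neg h2] at h
        have h' : Lg K vs (gcdI g v) = (vs.length : Int) := by push_cast at h; omega
        obtain ⟨he, hw⟩ := ih (gcdI g v) (by omega) h'
        refine ⟨?_, ?_⟩
        · intro u hu
          rcases List.mem_cons.mp hu with rfl | hu
          · omega
          · exact he u hu
        · rw [wg_cons]; exact hw

theorem Lg_full (K : Int) (vs : List Int) : ∀ g, K ≤ g → (∀ u ∈ vs, K ≤ u) → K ≤ wg g vs →
    Lg K vs g = (vs.length : Int) := by
  induction vs with
  | nil => intro g _ _ _; simp [Lg]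
  | cons v vs ih =>
    intro g hg he hw
    have hv : K ≤ v := he v (List.mem_cons_self)
    rw [wg_cons] at hw
    have hg' : K ≤ gcdI g v := by
      rcases (by omega : K ≤ 0 ∨ 0 < K) with hK | hK
      · exact hK.trans (gcdI_nonneg g v)
      · have : gcdI g v ≠ 0 := gcdI_ne_zero g v (by omega)
        have hpos : 0 < gcdI g v := lt_of_le_of_ne (gcdI_nonneg g v) (Ne.symm this)
        exact hw.trans (Int.le_of_dvd hpos (wg_dvd vs (gcdI g v)))
    simp only [Lg, List.length_cons]
    rw [if_neg (by omega), if_neg (by omega)]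
    rw [ih (gcdI g v) hg' (fun u hu => he u (List.mem_cons_of_mem v hu)) hw]
    push_cast; ring

theorem pl_nonneg (K : Int) (l : List Int) : 0 ≤ pl K l := by
  cases l with
  | nil => simp [pl]
  | cons v vs =>
    simp only [pl]
    split_ifs
    · omega
    · have := Lg_nonneg K vs v; omega

theorem pl_le_length (K : Int) (l : List Int) : pl K l ≤ (l.length : Int) := by
  cases l with
  | nil => simp [pl]
  | cons v vs =>
    simp only [pl, List.length_cons]
    split_ifs
    · push_cast; omega
    · have := Lg_le_length K vs v; push_cast; omega

-- the whole (nonempty) list is consumed greedily iff it is a good window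
theorem pl_full_iff (K v : Int) (vs : List Int) :
    pl K (v :: vs) = ((v :: vs).length : Int) ↔ ((∀ u ∈ v :: vs, K ≤ u) ∧ K ≤ wg v vs) := by
  constructor
  · intro h
    simp only [pl, List.length_cons] at h
    by_cases h1 : v < K
    · rw [if_pos h1] at h; push_cast at h; have := Lg_nonneg K vs v; omega
    · rw [if_neg h1] at h
      have h' : Lg K vs v = (vs.length : Int) := by push_cast at h; omega
      obtain ⟨he, hw⟩ := Lg_sound K vs v (by omega) h'
      refine ⟨?_, hw⟩
      intro u hu
      rcases List.mem_cons.mp hu with rfl | hu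
      · omega
      · exact he u hu
  · rintro ⟨he, hw⟩
    have hv : K ≤ v := he v (List.mem_cons_self)
    simp only [pl, List.length_cons]
    rw [if_neg (by omega), Lg_full K vs v (by omega) (fun u hu => he u (List.mem_cons_of_mem v hu)) hw]
    push_cast; ring

theorem goA_break (K : Int) (vs : List Int) (g cnt len : Int) (h : g < K) :
    goA K vs g cnt len = len := by
  cases vs with
  | nil => rfl
  | cons v vs => simp only [goA]; rw [if_pos (Or.inr h)]

theorem goA_eq (K : Int) (vs : List Int) : ∀ g cnt len, K ≤ g → len ≤ cnt - 1 →
    goA K vs g cnt len = if Lg K vs g = 0 then len else cnt - 1 + Lg K vs g := by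
  induction vs with
  | nil => intro g cnt len _ _; simp [goA, Lg]
  | cons v vs ih =>
    intro g cnt len hg hlen
    simp only [goA, Lg]
    by_cases h1 : v < K
    · rw [if_pos (Or.inl h1), if_pos h1, if_pos rfl]
    · rw [if_neg (by rintro (h | h) <;> omega), if_neg h1]
      by_cases h2 : gcdI g v < K
      · rw [if_pos h2, if_neg (by omega), goA_break K vs (gcdI g v) (cnt + 1) _ h2, if_pos rfl]
      · rw [if_neg h2, if_pos (by omega)]
        have hL := Lg_nonneg K vs (gcdI g v)
        rw [ih (gcdI g v) (cnt + 1) cnt (by omega) (by omega)]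
        by_cases hz : Lg K vs (gcdI g v) = 0
        · rw [if_pos hz, if_neg (by omega)]
          omega
        · rw [if_neg hz, if_neg (by omega)]
          ring
  termination_by vs => vs.length

theorem goA_one (K v : Int) (vs : List Int) (hv : K ≤ v) :
    goA K vs v 2 1 = 1 + Lg K vs v := by
  rw [goA_eq K vs v 2 1 hv (by omega)]
  by_cases hz : Lg K vs v = 0
  · rw [if_pos hz]; omega
  · rw [if_neg hz]; ring

theorem MG_nonneg (K : Int) (l : List Int) : 0 ≤ MG K l := by
  induction l with
  | nil => simp [MG]
  | cons v vs ih => simp only [MG]; have := pl_nonneg K (v :: vs); omega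

theorem outA_eq (K : Int) (l : List Int) : ∀ best, 0 ≤ best → outA K l best = max best (MG K l) := by
  induction l with
  | nil => intro best h; simp only [outA, MG]; omega
  | cons v vs ih =>
    intro best h
    simp only [outA, MG]
    by_cases h1 : v < K
    · rw [if_pos h1, ih best h]
      have h2 : pl K (v :: vs) = 0 := by simp [pl, h1]
      rw [h2]
      have := MG_nonneg K vs; omega
    · rw [if_neg h1]
      have hg := goA_one K v vs (by omega)
      have h2 : pl K (v :: vs) = 1 + Lg K vs v := by simp [pl, h1]
      have hL := Lg_nonneg K vs v
      rw [ih _ (by omega), hg, h2]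
      omega

theorem msl_nonneg (K : Int) (gs : List Int) : 0 ≤ msl K gs := by
  induction gs with
  | nil => simp [msl]
  | cons g gs ih =>
    simp only [msl]
    split_ifs <;> omega

theorem msl_le_length (K : Int) (gs : List Int) : msl K gs ≤ (gs.length : Int) := by
  induction gs with
  | nil => simp [msl]
  | cons g gs ih =>
    simp only [msl, List.length_cons]
    split_ifs <;> push_cast <;> omega

theorem msl_snoc (K g : Int) (gs : List Int) :
    msl K (gs ++ [g]) = if K ≤ g then (gs.length : Int) + 1 else msl K gs := by
  induction gs with
  | nil => simp only [List.nil_append, msl, List.length_nil]; split_ifs <;> simp [msl]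
  | cons g0 gs ih =>
    simp only [List.cons_append, msl, ih, List.length_cons]
    have h1 := msl_nonneg K gs
    have h2 := msl_le_length K gs
    by_cases hg : K ≤ g
    · rw [if_pos hg, if_pos hg, if_neg (by push_cast; omega)]
      push_cast; ring
    · rw [if_neg hg, if_neg hg]

theorem sfxF_snoc (K a : Int) (l : List Int) :
    sfxF K (l ++ [a]) = sfxStep K (sfxF K l) a := by
  simp [sfxF, List.foldl_append]

theorem sfxF_length_le (K : Int) (l : List Int) : (sfxF K l).length ≤ l.length := by
  induction l using List.reverseRecOn with
  | nil => simp [sfxF]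
  | append_singleton p a ih =>
    rw [sfxF_snoc]
    simp only [sfxStep, List.length_append, List.length_cons, List.length_nil]
    split_ifs
    · simp
    · simp only [List.length_cons, List.length_map]; omega

theorem sfxF_length_eq_iff (K : Int) (l : List Int) :
    (sfxF K l).length = l.length ↔ ∀ u ∈ l, K ≤ u := by
  induction l using List.reverseRecOn with
  | nil => simp [sfxF]
  | append_singleton p a ih =>
    rw [sfxF_snoc]
    simp only [sfxStep]
    by_cases ha : a < K
    · rw [if_pos ha]
      simp only [List.length_nil, List.length_append, List.length_cons]
      constructor
      · intro h; simp only [List.length_nil, List.length_append, List.length_cons] at h; omega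
      · intro h; exact absurd (h a (by simp)) (by omega)
    · rw [if_neg ha]
      simp only [List.length_cons, List.length_map, List.length_append, List.length_nil]
      have hle := sfxF_length_le K p
      constructor
      · intro h
        intro u hu
        rcases List.mem_append.mp hu with hu | hu
        · exact (ih.mp (by omega)) u hu
        · simp at hu; omega
      · intro h
        have : (sfxF K p).length = p.length := ih.mpr (fun u hu => h u (List.mem_append_left _ hu))
        omega

theorem sfxF_cons (K v : Int) (m : List Int) :
    sfxF K (v :: m) = sfxF K m ++
      (if (sfxF K m).length = m.length ∧ ¬ v < K then [wg v m] else []) := by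
  induction m using List.reverseRecOn with
  | nil =>
    simp only [sfxF, List.foldl_nil, List.foldl_cons, sfxStep, List.length_nil, wg_nil]
    by_cases hv : v < K
    · rw [if_pos hv]; simp [hv]
    · rw [if_neg hv]; simp [hv]
  | append_singleton m' a ih =>
    have h1 : v :: (m' ++ [a]) = (v :: m') ++ [a] := by simp
    rw [h1, sfxF_snoc, sfxF_snoc, ih]
    by_cases ha : a < K
    · simp only [sfxStep, if_pos ha, List.length_nil, List.length_append, List.length_cons]
      rw [if_neg]
      · simp
      · rintro ⟨h, -⟩; omega
    · simp only [sfxStep, if_neg ha, List.length_cons, List.length_map, List.length_append,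
        List.length_nil]
      have hle := sfxF_length_le K m'
      by_cases hc : (sfxF K m').length = m'.length ∧ ¬ v < K
      · have hc' : (sfxF K m').length + 1 = m'.length + 1 ∧ ¬ v < K := ⟨by omega, hc.2⟩
        simp only [if_pos hc, if_pos hc', List.map_append, List.map_cons, List.map_nil,
          wg_append_singleton]
        simp
      · have hc' : ¬ ((sfxF K m').length + 1 = m'.length + 1 ∧ ¬ v < K) := by
          rintro ⟨h, hv⟩; exact hc ⟨by omega, hv⟩
        simp only [if_neg hc, if_neg hc']
        simp

theorem esl_nil (K : Int) : esl K [] = 0 := by simp [esl, sfxF, msl]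

theorem esl_cons (K v : Int) (m : List Int) :
    esl K (v :: m) =
      if (∀ u ∈ m, K ≤ u) ∧ ¬ v < K ∧ K ≤ wg v m then (m.length : Int) + 1 else esl K m := by
  unfold esl
  rw [sfxF_cons]
  by_cases hc : (sfxF K m).length = m.length ∧ ¬ v < K
  · rw [if_pos hc, msl_snoc]
    have hlen : ((sfxF K m).length : Int) = (m.length : Int) := by rw [hc.1]
    by_cases hw : K ≤ wg v m
    · rw [if_pos hw, if_pos ⟨(sfxF_length_eq_iff K m).mp hc.1, hc.2, hw⟩, hlen]
    · rw [if_neg hw, if_neg (fun h => hw h.2.2)]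
  · rw [if_neg hc]
    simp only [List.append_nil]
    rw [if_neg (fun h => hc ⟨(sfxF_length_eq_iff K m).mpr h.1, h.2.1⟩)]

theorem MG_le_length (K : Int) (l : List Int) : MG K l ≤ (l.length : Int) := by
  induction l with
  | nil => simp [MG]
  | cons v vs ih =>
    simp only [MG, List.length_cons]
    have h1 := pl_le_length K (v :: vs)
    simp only [List.length_cons] at h1
    push_cast at *
    omega

theorem esl_le_length (K : Int) (l : List Int) : esl K l ≤ (l.length : Int) := by
  unfold esl
  have h1 := msl_le_length K (sfxF K l)
  have h2 := sfxF_length_le K l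
  have : ((sfxF K l).length : Int) ≤ (l.length : Int) := by exact_mod_cast h2
  omega

-- the window v::p can be extended by a iff the whole window v::p++[a] is good
theorem cfg (K v a : Int) (p : List Int) :
    (((∀ u ∈ v :: p, K ≤ u) ∧ K ≤ wg v p) ∧ ¬ a < K ∧ K ≤ gcdI (wg v p) a) ↔
      ((∀ u ∈ p ++ [a], K ≤ u) ∧ ¬ v < K ∧ K ≤ wg v (p ++ [a])) := by
  rw [wg_append_singleton]
  constructor
  · rintro ⟨⟨he, hw⟩, ha, hg⟩
    refine ⟨?_, ?_, hg⟩
    · intro u hu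
      rcases List.mem_append.mp hu with hu | hu
      · exact he u (List.mem_cons_of_mem v hu)
      · simp at hu; omega
    · have := he v List.mem_cons_self; omega
  · rintro ⟨he, hv, hg⟩
    have hwp : K ≤ wg v p := by
      cases p with
      | nil => rw [wg_nil]; omega
      | cons u p' =>
        rcases (by omega : K ≤ 0 ∨ 0 < K) with hK | hK
        · exact hK.trans (wg_nonneg p' (gcdI v u) (gcdI_nonneg v u))
        · exact le_of_le_gcdI K _ a hg (wg_pos (u :: p') v (by omega))
    refine ⟨⟨?_, hwp⟩, ?_, hg⟩
    · intro u hu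
      rcases List.mem_cons.mp hu with rfl | hu
      · omega
      · exact he u (List.mem_append_left _ hu)
    · have := he a (by simp); omega

theorem pl_snoc_of_not_full (K v a : Int) (p : List Int)
    (h : ¬ ((∀ u ∈ p ++ [a], K ≤ u) ∧ ¬ v < K ∧ K ≤ wg v (p ++ [a]))) :
    pl K (v :: (p ++ [a])) = pl K (v :: p) := by
  simp only [pl]
  by_cases hv : v < K
  · rw [if_pos hv, if_pos hv]
  · rw [if_neg hv, if_neg hv, Lg_snoc]
    rw [if_neg]
    rintro ⟨hfull, ha, hg⟩
    have hfull' : pl K (v :: p) = ((v :: p).length : Int) := by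
      simp only [pl, List.length_cons]
      rw [if_neg hv, hfull]
      push_cast; ring
    obtain ⟨he, hw⟩ := (pl_full_iff K v p).mp hfull'
    exact h ((cfg K v a p).mp ⟨⟨he, hw⟩, ha, hg⟩)

theorem pl_snoc_of_full (K v a : Int) (p : List Int)
    (h : (∀ u ∈ p ++ [a], K ≤ u) ∧ ¬ v < K ∧ K ≤ wg v (p ++ [a])) :
    pl K (v :: (p ++ [a])) = ((p.length : Int)) + 2 := by
  have hfull : pl K (v :: (p ++ [a])) = ((v :: (p ++ [a])).length : Int) := by
    refine (pl_full_iff K v (p ++ [a])).mpr ⟨?_, h.2.2⟩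
    intro u hu
    rcases List.mem_cons.mp hu with rfl | hu
    · have := h.2.1; omega
    · exact h.1 u hu
  rw [hfull]
  simp only [List.length_cons, List.length_append, List.length_cons, List.length_nil]
  push_cast; ring

theorem exchange (K a : Int) (p : List Int) :
    MG K (p ++ [a]) = max (MG K p) (esl K (p ++ [a])) := by
  induction p with
  | nil =>
    simp only [List.nil_append, MG]
    rw [esl_cons]
    by_cases ha : a < K
    · rw [if_neg (fun h => h.2.1 ha)]
      simp [pl, ha, esl_nil, MG]
    · rw [if_pos ⟨by simp, ha, by rw [wg_nil]; omega⟩]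
      simp [pl, ha, MG, Lg]
  | cons v p ih =>
    have h1 : (v :: p) ++ [a] = v :: (p ++ [a]) := rfl
    rw [h1]
    simp only [MG]
    rw [ih, esl_cons]
    by_cases hFG : (∀ u ∈ p ++ [a], K ≤ u) ∧ ¬ v < K ∧ K ≤ wg v (p ++ [a])
    · rw [if_pos hFG, pl_snoc_of_full K v a p hFG]
      have b1 := pl_le_length K (v :: p)
      have b2 := MG_le_length K p
      have b3 := esl_le_length K (p ++ [a])
      have b4 := pl_nonneg K (v :: p)
      simp only [List.length_cons, List.length_append, List.length_nil] at b1 b3 ⊢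
      push_cast at b1 b3 ⊢
      omega
    · rw [if_neg hFG, pl_snoc_of_not_full K v a p hFG]
      omega

theorem take_elem (array : List Int) (n : Nat) (p vs : List Int) (v : Int)
    (h : p ++ v :: vs = array.take n) (hn : n ≤ array.length) :
    array.getD p.length 0 = v := by
  have h1 : p.length < n := by
    have := congrArg List.length h
    simp only [List.length_append, List.length_cons, List.length_take] at this
    omega
  have h2 : (p ++ v :: vs)[p.length]? = some v := by
    rw [List.getElem?_append_right (le_refl _)]
    simp
  have h3 : array[p.length]? = some v := by
    rw [← List.getElem?_take_of_lt h1, ← h, h2]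
  rw [List.getD_eq_getElem?_getD, h3]
  rfl

theorem take_len (array : List Int) (N : Int) (hN : 0 ≤ N) (hl : N ≤ (array.length : Int))
    (p vs : List Int) (h : p ++ vs = array.take N.toNat) :
    ((p.length : Int) + (vs.length : Int) = N) := by
  have h1 := congrArg List.length h
  simp only [List.length_append, List.length_take] at h1
  omega

theorem inner_bridge (array : List Int) (K N x : Int) (hN : 0 ≤ N)
    (hl : N ≤ (array.length : Int)) :
    ∀ (vs p : List Int), p ++ vs = array.take N.toNat → ∀ (g len : Int),
      aInner array K x (PySem.List.pyRange (p.length : Int) N 1) g len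
        = goA K vs g ((p.length : Int) - x + 1) len := by
  intro vs
  induction vs with
  | nil =>
    intro p hp g len
    have h1 := take_len array N hN hl p [] hp
    rw [PySem.List.pyRange_one_eq_nil (by simp at h1; omega)]
    rfl
  | cons v vs' ih =>
    intro p hp g len
    have h1 := take_len array N hN hl p (v :: vs') hp
    simp only [List.length_cons] at h1
    rw [PySem.List.pyRange_one_cons (by push_cast at h1 ⊢; omega)]
    simp only [aInner, goA]
    have hv : PySem.List.pyGetD array ((p.length : Nat) : Int) 0 = v := by
      rw [PySem.List.pyGetD_natCast]
      exact take_elem array N.toNat p vs' v hp (by omega)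
    rw [hv]
    by_cases hb : v < K ∨ g < K
    · rw [if_pos hb, if_pos hb]
    · rw [if_neg hb, if_neg hb]
      have h2 : ((p.length : Int)) + 1 = (((p ++ [v]).length : Nat) : Int) := by
        push_cast; simp
      have h3 : p ++ [v] ++ vs' = array.take N.toNat := by simpa using hp
      rw [h2, ih (p ++ [v]) h3]
      have h4 : (((p ++ [v]).length : Nat) : Int) - x + 1 = ((p.length : Int) - x + 1) + 1 := by
        push_cast; simp; ring
      rw [h4]

theorem outer_bridge (array : List Int) (K N : Int) (hN : 0 ≤ N)
    (hl : N ≤ (array.length : Int)) :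
    ∀ (vs p : List Int), p ++ vs = array.take N.toNat → ∀ best : Int,
      (PySem.List.pyRange (p.length : Int) N 1).foldl (fun ml x =>
        let ax := PySem.List.pyGetD array x 0
        if ax < K then ml
        else max ml (aInner array K x (PySem.List.pyRange (x + 1) N 1) ax 1)) best
      = outA K vs best := by
  intro vs
  induction vs with
  | nil =>
    intro p hp best
    have h1 := take_len array N hN hl p [] hp
    rw [PySem.List.pyRange_one_eq_nil (by simp at h1; omega)]
    rfl
  | cons v vs' ih =>
    intro p hp best
    have h1 := take_len array N hN hl p (v :: vs') hp
    simp only [List.length_cons] at h1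
    rw [PySem.List.pyRange_one_cons (by push_cast at h1 ⊢; omega)]
    rw [List.foldl_cons]
    have hv : PySem.List.pyGetD array ((p.length : Nat) : Int) 0 = v := by
      rw [PySem.List.pyGetD_natCast]
      exact take_elem array N.toNat p vs' v hp (by omega)
    simp only [hv, outA]
    have h3 : p ++ [v] ++ vs' = array.take N.toNat := by simpa using hp
    by_cases hb : v < K
    · rw [if_pos hb, if_pos hb]
      have h2 : ((p.length : Int)) + 1 = (((p ++ [v]).length : Nat) : Int) := by push_cast; simp
      rw [h2, ih (p ++ [v]) h3]
    · rw [if_neg hb, if_neg hb]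
      have h2 : ((p.length : Int)) + 1 = (((p ++ [v]).length : Nat) : Int) := by push_cast; simp
      have h5 := inner_bridge array K N ((p.length : Nat) : Int) hN hl vs' (p ++ [v]) h3 v 1
      rw [h2, h5, ih (p ++ [v]) h3]
      have h4 : (((p ++ [v]).length : Nat) : Int) - ((p.length : Nat) : Int) + 1 = 2 := by
        push_cast; simp
      rw [h4]

theorem maxQ_nonneg (K : Int) (P : List (Int × Int)) : 0 ≤ maxQ K P := by
  induction P with
  | nil => simp [maxQ]
  | cons x ps ih => obtain ⟨g, l⟩ := x; simp only [maxQ]; omega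

theorem bScanP_eq (K : Int) (P : List (Int × Int)) : ∀ best, 0 ≤ best →
    bScanP K P best = max best (maxQ K P) := by
  induction P with
  | nil => intro best h; simp only [bScanP, maxQ]; omega
  | cons x ps ih =>
    intro best h
    obtain ⟨g, l⟩ := x
    simp only [bScanP, maxQ]
    by_cases hg : K ≤ g
    · by_cases hb : best < l
      · rw [if_pos ⟨hg, hb⟩, ih l (by omega)]
        have := maxQ_nonneg K ps; omega
      · rw [if_neg (fun hc => hb hc.2), ih best h]
        have := maxQ_nonneg K ps; omega
    · rw [if_neg (fun hc => hg hc.1), ih best h]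
      have := maxQ_nonneg K ps; omega

theorem le_maxQ (K : Int) (P : List (Int × Int)) (x : Int × Int) (hx : x ∈ P)
    (hg : K ≤ x.1) : x.2 ≤ maxQ K P := by
  induction P with
  | nil => simp at hx
  | cons y ps ih =>
    obtain ⟨g, l⟩ := y
    simp only [maxQ]
    rcases List.mem_cons.mp hx with rfl | hx
    · rw [if_pos hg]; omega
    · have := ih hx; omega

theorem maxQ_le (K : Int) (P : List (Int × Int)) (B : Int) (hB : 0 ≤ B)
    (h : ∀ x ∈ P, K ≤ x.1 → x.2 ≤ B) : maxQ K P ≤ B := by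
  induction P with
  | nil => simp [maxQ]; omega
  | cons y ps ih =>
    obtain ⟨g, l⟩ := y
    simp only [maxQ]
    have h1 := ih (fun x hx => h x (List.mem_cons_of_mem _ hx))
    by_cases hg : K ≤ g
    · have := h (g, l) List.mem_cons_self hg; rw [if_pos hg]; omega
    · rw [if_neg hg]; omega

theorem msl_realize (K : Int) (s : List Int) :
    msl K s = 0 ∨ ∃ j : Nat, j < s.length ∧ msl K s = (j : Int) + 1 ∧
      ∃ g, s[j]? = some g ∧ K ≤ g := by
  induction s with
  | nil => left; simp [msl]
  | cons g gs ih =>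
    by_cases hm : msl K gs = 0
    · by_cases hg : K ≤ g
      · right
        refine ⟨0, by simp, by simp [msl, hm, hg], g, by simp, hg⟩
      · left; simp [msl, hm, hg]
    · rcases ih with h0 | ⟨j, hj, hmsl, g', hg', hKg'⟩
      · exact absurd h0 hm
      · right
        refine ⟨j + 1, by simp; omega, ?_, g', by simpa using hg', hKg'⟩
        simp only [msl, if_neg hm]
        push_cast; omega

theorem msl_ge (K : Int) (s : List Int) : ∀ (j : Nat) g, s[j]? = some g → K ≤ g →
    (j : Int) + 1 ≤ msl K s := by
  induction s with
  | nil => intro j g h _; simp at h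
  | cons g0 gs ih =>
    intro j g hj hKg
    cases j with
    | zero =>
      simp at hj
      subst hj
      have := msl_nonneg K gs
      simp only [msl]
      split_ifs <;> omega
    | succ j' =>
      simp only [List.getElem?_cons_succ] at hj
      have h1 := ih j' g hj hKg
      simp only [msl]
      rw [if_neg (by omega)]
      push_cast at h1 ⊢
      omega

theorem bUpd_members (a : Int) : ∀ (P : List (Int × Int)) (c x : Int × Int),
    x ∈ bUpd a c P → x = c ∨ ∃ p ∈ P, x = (gcdI p.1 a, p.2 + 1) := by
  intro P
  induction P with
  | nil => intro c x hx; simp [bUpd] at hx; left; exact hx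
  | cons y rest ih =>
    intro c x hx
    obtain ⟨g, l⟩ := y
    simp only [bUpd] at hx
    by_cases hc : c.1 = gcdI g a
    · rw [if_pos hc] at hx
      rcases ih (gcdI g a, l + 1) x hx with rfl | ⟨p, hp, hxp⟩
      · right; exact ⟨(g, l), List.mem_cons_self, rfl⟩
      · right; exact ⟨p, List.mem_cons_of_mem _ hp, hxp⟩
    · rw [if_neg hc] at hx
      rcases List.mem_cons.mp hx with rfl | hx
      · left; rfl
      · rcases ih (gcdI g a, l + 1) x hx with rfl | ⟨p, hp, hxp⟩
        · right; exact ⟨(g, l), List.mem_cons_self, rfl⟩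
        · right; exact ⟨p, List.mem_cons_of_mem _ hp, hxp⟩

theorem bUpd_sorted (a : Int) : ∀ (P : List (Int × Int)) (c : Int × Int),
    List.Pairwise (fun x y : Int × Int => x.2 < y.2) P → (∀ p ∈ P, c.2 ≤ p.2) →
    List.Pairwise (fun x y : Int × Int => x.2 < y.2) (bUpd a c P) ∧
      ∀ x ∈ bUpd a c P, c.2 ≤ x.2 := by
  intro P
  induction P with
  | nil =>
    intro c _ _
    constructor
    · simp [bUpd]
    · intro x hx; simp [bUpd] at hx; subst hx; omega
  | cons y rest ih =>
    intro c hP hc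
    obtain ⟨g, l⟩ := y
    have hcl : c.2 ≤ l := hc (g, l) List.mem_cons_self
    have hrest : ∀ p ∈ rest, l < p.2 := fun p hp => (List.pairwise_cons.mp hP).1 p hp
    have hrec := ih (gcdI g a, l + 1) (List.pairwise_cons.mp hP).2
      (fun p hp => by have := hrest p hp; simp; omega)
    simp only [bUpd]
    by_cases hcc : c.1 = gcdI g a
    · rw [if_pos hcc]
      refine ⟨hrec.1, fun x hx => ?_⟩
      have := hrec.2 x hx; simp at this; omega
    · rw [if_neg hcc]
      constructor
      · rw [List.pairwise_cons]
        refine ⟨fun x hx => ?_, hrec.1⟩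
        have := hrec.2 x hx; simp at this; omega
      · intro x hx
        rcases List.mem_cons.mp hx with rfl | hx
        · omega
        · have := hrec.2 x hx; simp at this; omega

-- image of a realized pair after extending every window by a
theorem Rea_image (s : List Int) (a : Int) (p : Int × Int) (h : Rea s p) :
    Rea (a :: s.map (fun g => gcdI g a)) (gcdI p.1 a, p.2 + 1) := by
  obtain ⟨j, hj, hl, hg⟩ := h
  refine ⟨j + 1, by simp; omega, by simp; push_cast; omega, ?_⟩
  simp only [List.getElem?_cons_succ, List.getElem?_map, hg, Option.map_some]

theorem bUpd_cov (s : List Int) (a : Int) (i : Nat) :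
    ∀ (P : List (Int × Int)) (c : Int × Int),
    (∀ p ∈ P, Rea s p) → List.Pairwise (fun x y : Int × Int => x.2 < y.2) P →
    (∀ p ∈ P, c.2 ≤ p.2) →
    (Cov (a :: s.map (fun g => gcdI g a)) i c ∨
      ∃ p ∈ P, Cov (a :: s.map (fun g => gcdI g a)) i (gcdI p.1 a, p.2 + 1)) →
    ∃ x ∈ bUpd a c P, Cov (a :: s.map (fun g => gcdI g a)) i x := by
  intro P
  induction P with
  | nil =>
    intro c _ _ _ hcov
    rcases hcov with hc | ⟨p, hp, _⟩
    · exact ⟨c, by simp [bUpd], hc⟩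
    · simp at hp
  | cons y rest ih =>
    intro c hre hP hc hcov
    obtain ⟨g, l⟩ := y
    have hcl : c.2 ≤ l := hc (g, l) List.mem_cons_self
    have hrest : ∀ p ∈ rest, l < p.2 := fun p hp => (List.pairwise_cons.mp hP).1 p hp
    have hre' : ∀ p ∈ rest, Rea s p := fun p hp => hre p (List.mem_cons_of_mem _ hp)
    have hP' := (List.pairwise_cons.mp hP).2
    have hc' : ∀ p ∈ rest, ((gcdI g a, l + 1) : Int × Int).2 ≤ p.2 := by
      intro p hp; have := hrest p hp; simp; omega
    simp only [bUpd]
    by_cases hcc : c.1 = gcdI g a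
    · rw [if_pos hcc]
      apply ih (gcdI g a, l + 1) hre' hP' hc'
      rcases hcov with hcov | ⟨p, hp, hcov⟩
      · -- transfer Cov c to the merged pair (gcdI g a, l + 1)
        left
        obtain ⟨j, hij, hjlen, hl2, hval, heq⟩ := hcov
        obtain ⟨j0, hj0, hl0, hg0⟩ := hre (g, l) List.mem_cons_self
        refine ⟨j0 + 1, by omega, by simp; omega, by simp; push_cast; omega, ?_, ?_⟩
        · simp only [List.getElem?_cons_succ, List.getElem?_map, hg0, Option.map_some]
        · have h1 : (a :: s.map (fun g => gcdI g a))[j0 + 1]? = some c.1 := by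
            simp only [List.getElem?_cons_succ, List.getElem?_map, hg0, Option.map_some]
            rw [← hcc]
          rw [h1, ← heq, hval]
      · rcases List.mem_cons.mp hp with rfl | hp
        · left; exact hcov
        · right; exact ⟨p, hp, hcov⟩
    · rw [if_neg hcc]
      rcases hcov with hcov | ⟨p, hp, hcov⟩
      · exact ⟨c, List.mem_cons_self, hcov⟩
      · have : ∃ x ∈ bUpd a (gcdI g a, l + 1) rest,
            Cov (a :: s.map (fun g => gcdI g a)) i x := by
          apply ih (gcdI g a, l + 1) hre' hP' hc'
          rcases List.mem_cons.mp hp with rfl | hp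
          · left; exact hcov
          · right; exact ⟨p, hp, hcov⟩
        obtain ⟨x, hx, hcx⟩ := this
        exact ⟨x, List.mem_cons_of_mem _ hx, hcx⟩

-- one step of B preserves the dedup invariant
theorem pinv_step (K a : Int) (s : List Int) (P : List (Int × Int))
    (h : PInv P s) : PInv (bUpd a (a, 1) P) (a :: s.map (fun g => gcdI g a)) := by
  obtain ⟨hre, hcov, hsort⟩ := h
  have hone : ∀ p ∈ P, ((a, (1 : Int)) : Int × Int).2 ≤ p.2 := by
    intro p hp
    obtain ⟨j, _, hl, _⟩ := hre p hp
    simp; omega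
  refine ⟨?_, ?_, ?_⟩
  · intro x hx
    rcases bUpd_members a P (a, 1) x hx with rfl | ⟨p, hp, rfl⟩
    · exact ⟨0, by simp, by simp, by simp⟩
    · exact Rea_image s a p (hre p hp)
  · intro i hi
    cases i with
    | zero =>
      apply bUpd_cov s a 0 P (a, 1) hre hsort hone
      left
      exact ⟨0, le_refl 0, by simp, by simp, by simp, rfl⟩
    | succ i0 =>
      simp only [List.length_cons, List.length_map] at hi
      obtain ⟨x, hx, j, hij, hjlen, hl2, hval, heq⟩ := hcov i0 (by omega)
      apply bUpd_cov s a (i0 + 1) P (a, 1) hre hsort hone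
      right
      refine ⟨x, hx, j + 1, by omega, by simp; omega, by simp; push_cast; omega, ?_, ?_⟩
      · simp only [List.getElem?_cons_succ, List.getElem?_map, hval, Option.map_some]
      · simp only [List.getElem?_cons_succ, List.getElem?_map, heq]
  · exact (bUpd_sorted a P (a, 1) hsort hone).1

-- under the invariant, the dedup query agrees with the full-list query
theorem maxQ_eq_msl (K : Int) (P : List (Int × Int)) (s : List Int)
    (h : PInv P s) : maxQ K P = msl K s := by
  obtain ⟨hre, hcov, _⟩ := h
  apply le_antisymm
  · apply maxQ_le K P (msl K s) (msl_nonneg K s)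
    intro x hx hKx
    obtain ⟨j, hjlen, hl, hval⟩ := hre x hx
    have := msl_ge K s j x.1 hval hKx
    omega
  · rcases msl_realize K s with h0 | ⟨j, hjlen, hmsl, g, hval, hKg⟩
    · rw [h0]; exact maxQ_nonneg K P
    · obtain ⟨x, hx, j', hjj', hj'len, hl2, hval', heq⟩ := hcov j hjlen
      have hx1 : x.1 = g := by
        rw [heq, hval] at hval'
        exact (Option.some_inj.mp hval').symm
      have := le_maxQ K P x hx (by omega)
      omega

-- B's fold computes MG and a pair list satisfying the invariant
theorem bfold2 (K : Int) (l : List Int) :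
    (l.foldl (stepB2 K) ((0 : Int), ([] : List (Int × Int)))).1 = MG K l ∧
      PInv (l.foldl (stepB2 K) ((0 : Int), ([] : List (Int × Int)))).2 (sfxF K l) := by
  induction l using List.reverseRecOn with
  | nil =>
    refine ⟨by simp [MG], ?_, ?_, ?_⟩ <;> simp [sfxF, Rea, Cov]
  | append_singleton p a ih =>
    rw [List.foldl_append, List.foldl_cons, List.foldl_nil]
    obtain ⟨ih1, ih2⟩ := ih
    set st := p.foldl (stepB2 K) ((0 : Int), ([] : List (Int × Int))) with hst
    rw [sfxF_snoc]
    unfold stepB2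
    by_cases ha : a < K
    · rw [if_pos ha]
      have h1 : sfxStep K (sfxF K p) a = [] := by simp [sfxStep, ha]
      have h2 : MG K (p ++ [a]) = MG K p := by
        rw [exchange]
        have h3 : esl K (p ++ [a]) = 0 := by unfold esl; rw [sfxF_snoc, h1]; simp [msl]
        have := MG_nonneg K p
        rw [h3]; omega
      rw [h1, h2]
      exact ⟨ih1, by simp [Rea], by simp, by simp⟩
    · rw [if_neg ha]
      have h1 : sfxStep K (sfxF K p) a = a :: (sfxF K p).map (fun g => gcdI g a) := by
        simp [sfxStep, ha]
      have hpinv : PInv (bUpd a (a, 1) st.2) (sfxStep K (sfxF K p) a) := by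
        rw [h1]; exact pinv_step K a (sfxF K p) st.2 ih2
      refine ⟨?_, hpinv⟩
      have h2 : bScanP K (bUpd a (a, 1) st.2) st.1 = MG K (p ++ [a]) := by
        rw [ih1, bScanP_eq K _ _ (MG_nonneg K p),
            maxQ_eq_msl K _ _ hpinv, exchange]
        have h3 : esl K (p ++ [a]) = msl K (sfxStep K (sfxF K p) a) := by
          unfold esl; rw [sfxF_snoc]
        rw [h3]
      exact h2

theorem b_bridge (array : List Int) (K N : Int) (hN : 0 ≤ N)
    (hl : N ≤ (array.length : Int)) :
    ∀ (vs p : List Int), p ++ vs = array.take N.toNat → ∀ st : Int × List (Int × Int),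
      (PySem.List.pyRange (p.length : Int) N 1).foldl (fun st i =>
        let a := PySem.List.pyGetD array i 0
        if a < K then (st.1, ([] : List (Int × Int)))
        else
          let pairs := bUpd a (a, 1) st.2
          (bScanP K pairs st.1, pairs)) st
      = vs.foldl (stepB2 K) st := by
  intro vs
  induction vs with
  | nil =>
    intro p hp st
    have h1 := take_len array N hN hl p [] hp
    rw [PySem.List.pyRange_one_eq_nil (by simp at h1; omega)]
    rfl
  | cons v vs' ih =>
    intro p hp st
    have h1 := take_len array N hN hl p (v :: vs') hp
    simp only [List.length_cons] at h1
    rw [PySem.List.pyRange_one_cons (by push_cast at h1 ⊢; omega)]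
    rw [List.foldl_cons, List.foldl_cons]
    have hv : PySem.List.pyGetD array ((p.length : Nat) : Int) 0 = v := by
      rw [PySem.List.pyGetD_natCast]
      exact take_elem array N.toNat p vs' v hp (by omega)
    simp only [hv]
    have h3 : p ++ [v] ++ vs' = array.take N.toNat := by simpa using hp
    have h2 : ((p.length : Int)) + 1 = (((p ++ [v]).length : Nat) : Int) := by push_cast; simp
    rw [h2, ih (p ++ [v]) h3]
    rfl

-- ===== VERDICT (by name: the statement is the Claim_ definition above) =====
theorem largest_subarray_gcd_atleast_k_spec : Claim_equal_largest_subarray_gcd_atleast_k := by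
  unfold Claim_equal_largest_subarray_gcd_atleast_k
  intro array N K _ hPre
  unfold Spec_largest_subarray_gcd_atleast_k
  unfold Pre_largest_subarray_gcd_atleast_k at hPre
  by_cases hN : 0 ≤ N
  · have hA := outer_bridge array K N hN hPre (array.take N.toNat) [] (by simp) 0
    have hB := b_bridge array K N hN hPre (array.take N.toNat) [] (by simp)
      ((0 : Int), ([] : List (Int × Int)))
    simp only [List.length_nil, Nat.cast_zero] at hA hB
    unfold largest_subarray_gcd_atleast_k largest_subarray_gcd_atleast_k_alt
    rw [hA, hB, outA_eq K _ 0 (le_refl 0), (bfold2 K (array.take N.toNat)).1]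
    have := MG_nonneg K (array.take N.toNat)
    omega
  · unfold largest_subarray_gcd_atleast_k largest_subarray_gcd_atleast_k_alt
    rw [PySem.List.pyRange_one_eq_nil (by omega)]
    rfl
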